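-- pv_equiv track=rewrite | github.com/Semiys/AISD_Labs | Lab6.py | generate_menus_alg
-- ===== SOURCE A (Python) =====
-- def generate_menus_alg(fruits, N):
--     if N == 0:
--         yield []
--     else:
--         for m in fruits:
--             for rest_of_menu in generate_menus_alg(fruits, N - 1):
--                 if not rest_of_menu or m != rest_of_menu[-1]:
--                     yield [m] + rest_of_menu
-- ===== SOURCE B (Python) =====
-- def generate_menus_alg(fruits, N):
--     # iterative: materialize each recursion level once and reuse it for all outer choices
--     level = [[]]
--     for _ in range(N):
--         level = [[m] + r for m in fruits for r in level if not r or m != r[-1]]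
--     yield from level
-- ===== Notes on version B (the rewrite author's own statement) =====
-- stated objective: alternative
-- what changed: B replaces A's recursion, which recomputes the whole (N-1)-level result separately for every outer fruit choice, by a bottom-up loop that materializes each level's list exactly once and extends it with a single comprehension. Pre_ excludes N<0 and N>=900 (A's recursion depth N raises RecursionError near CPython's limit).
-- outside the precondition, e.g. on generate_menus_alg([], -1): A returns [], B returns [[]]; on generate_menus_alg(['a'], 950): A returns [], B returns []
import Mathlib
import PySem

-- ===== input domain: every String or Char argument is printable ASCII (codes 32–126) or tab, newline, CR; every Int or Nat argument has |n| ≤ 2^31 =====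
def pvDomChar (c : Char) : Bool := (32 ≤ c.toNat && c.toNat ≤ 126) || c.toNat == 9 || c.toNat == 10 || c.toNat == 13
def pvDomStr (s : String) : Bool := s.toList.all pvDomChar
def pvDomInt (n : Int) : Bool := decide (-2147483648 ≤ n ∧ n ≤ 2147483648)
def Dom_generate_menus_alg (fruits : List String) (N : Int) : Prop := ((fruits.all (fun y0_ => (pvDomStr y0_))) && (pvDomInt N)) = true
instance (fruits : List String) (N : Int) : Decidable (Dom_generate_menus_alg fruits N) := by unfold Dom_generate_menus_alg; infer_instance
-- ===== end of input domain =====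

-- B builds the menus bottom-up, materializing each recursion level once and reusing it across all outer fruit choices (alternative iterative formulation).


-- ===== PORT A =====
-- A's recursion on N, transliterated; the two nested generator loops become nested folds
-- appending each yielded menu to the output stream.  rest_of_menu[-1] is `rest.getLastD ""`,
-- only reached (as in Python's short-circuit `or`) when rest is nonempty.
def genA (fruits : List String) : Nat → List (List String)
  | 0 => [[]]
  | n + 1 =>
    fruits.foldl (fun acc m =>
      (genA fruits n).foldl (fun acc2 rest =>
        if rest.isEmpty || decide (m ≠ rest.getLastD "") then acc2 ++ [m :: rest] else acc2)
        acc) []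

def generate_menus_alg (fruits : List String) (N : Int) : List (List String) :=
  genA fruits N.toNat

-- ===== PORT B =====
-- one level materialized at a time; the list comprehension is flatMap / filter / map
def stepB (fruits : List String) (level : List (List String)) : List (List String) :=
  fruits.flatMap (fun m =>
    (level.filter (fun r => r.isEmpty || decide (m ≠ r.getLastD ""))).map (fun r => m :: r))

def generate_menus_alg_alt (fruits : List String) (N : Int) : List (List String) :=
  (List.range N.toNat).foldl (fun level _ => stepB fruits level) [[]]

-- ===== PRECONDITION & SPEC =====
-- Pre_ excludes N < 0 (there A hits RecursionError for nonempty fruits, or for fruits = []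
-- accidentally yields nothing, while B naturally returns [[]]) and N ≥ 900, where A's
-- N-deep recursion exceeds CPython's recursion limit and raises RecursionError (the cap is
-- a safety margin below the limit, so it also excludes some single-fruit inputs on which A
-- still returns [] — see the cites).
def Pre_generate_menus_alg (fruits : List String) (N : Int) : Prop := 0 ≤ N ∧ N < 900
instance (fruits : List String) (N : Int) : Decidable (Pre_generate_menus_alg fruits N) := by unfold Pre_generate_menus_alg; infer_instance
def pvWitness_generate_menus_alg : List String × Int := (["apple", "banana"], 2)
def Spec_generate_menus_alg (fruits : List String) (N : Int) (out : List (List String)) : Prop := out = generate_menus_alg_alt fruits N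
instance (fruits : List String) (N : Int) (out : List (List String)) : Decidable (Spec_generate_menus_alg fruits N out) := by unfold Spec_generate_menus_alg; infer_instance

-- ===== CLAIM (what is proved, stated in full; the proofs are below) =====
def Claim_equal_generate_menus_alg : Prop := ∀ (fruits : List String) (N : Int), Dom_generate_menus_alg fruits N → Pre_generate_menus_alg fruits N → Spec_generate_menus_alg fruits N (generate_menus_alg fruits N)

-- ===== LEMMAS AND PROOFS =====

-- the inner fold of A yields exactly the filtered-and-consed menus, appended to its accumulator
theorem genA_inner (m : String) (prev : List (List String)) (acc : List (List String)) :
    prev.foldl (fun acc2 rest =>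
        if rest.isEmpty || decide (m ≠ rest.getLastD "") then acc2 ++ [m :: rest] else acc2) acc
      = acc ++ (prev.filter (fun r => r.isEmpty || decide (m ≠ r.getLastD ""))).map (fun r => m :: r) := by
  induction prev generalizing acc with
  | nil => simp [List.foldl]
  | cons r rs ih =>
    rw [List.foldl_cons, List.filter_cons]
    by_cases h : (r.isEmpty || decide (m ≠ r.getLastD "")) = true
    · rw [if_pos h, if_pos h, ih, List.map_cons, List.append_assoc]; rfl
    · rw [if_neg h, if_neg h, ih]

-- the outer fold of A is B's flatMap
theorem genA_outer (fruits : List String) (prev : List (List String)) (acc : List (List String)) :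
    fruits.foldl (fun acc m =>
        prev.foldl (fun acc2 rest =>
          if rest.isEmpty || decide (m ≠ rest.getLastD "") then acc2 ++ [m :: rest] else acc2) acc) acc
      = acc ++ stepB fruits prev := by
  induction fruits generalizing acc with
  | nil => simp [stepB]
  | cons m ms ih =>
    simp only [List.foldl, stepB, List.flatMap_cons]
    rw [genA_inner, ih, List.append_assoc]
    rfl

theorem genA_succ (fruits : List String) (n : Nat) :
    genA fruits (n + 1) = stepB fruits (genA fruits n) := by
  have h := genA_outer fruits (genA fruits n) []
  simpa [genA] using h

theorem genA_eq_fold (fruits : List String) (n : Nat) :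
    genA fruits n = (List.range n).foldl (fun level _ => stepB fruits level) [[]] := by
  induction n with
  | zero => simp [genA]
  | succ k ih => rw [List.range_succ, List.foldl_append, ← ih, genA_succ]; rfl

-- ===== VERDICT (by name: the statement is the Claim_ definition above) =====
theorem generate_menus_alg_spec : Claim_equal_generate_menus_alg := by
  intro fruits N _ _
  unfold Spec_generate_menus_alg generate_menus_alg generate_menus_alg_alt
  exact genA_eq_fold fruits N.toNat
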